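-- pv_equiv track=rewrite | github.com/Mattshen0706/CS1114 | CS 1114/MIDTERM2prep/periodictableq.py | longest_name
-- ===== SOURCE A (Python) =====
-- def longest_name(periodic):
--     prev=0
--     newlist=[]
--     for elements in periodic:
--         if len(elements[0])>prev and len(elements[0])<12:
--             newlist=[]
--             newlist.append(elements[0])
--             prev=len(elements[0])
--         elif len(elements[0])==prev:
--             newlist.append(elements[0])
--     return newlist
-- ===== SOURCE B (Python) =====
-- def longest_name(periodic):
--     # max-then-filter decomposition: filter names under length 12, then keep those of max length
--     names = [elements[0] for elements in periodic if len(elements[0]) < 12]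
--     if not names:
--         return []
--     m = max(len(n) for n in names)
--     return [n for n in names if len(n) == m]
-- ===== Notes on version B (the rewrite author's own statement) =====
-- stated objective: simpler
-- what changed: Replaces the single-pass running-max-with-reset loop (rebuilding the accumulator whenever a longer name appears) by an explicit filter-then-max-then-filter decomposition over the qualifying names.
import Mathlib
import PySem

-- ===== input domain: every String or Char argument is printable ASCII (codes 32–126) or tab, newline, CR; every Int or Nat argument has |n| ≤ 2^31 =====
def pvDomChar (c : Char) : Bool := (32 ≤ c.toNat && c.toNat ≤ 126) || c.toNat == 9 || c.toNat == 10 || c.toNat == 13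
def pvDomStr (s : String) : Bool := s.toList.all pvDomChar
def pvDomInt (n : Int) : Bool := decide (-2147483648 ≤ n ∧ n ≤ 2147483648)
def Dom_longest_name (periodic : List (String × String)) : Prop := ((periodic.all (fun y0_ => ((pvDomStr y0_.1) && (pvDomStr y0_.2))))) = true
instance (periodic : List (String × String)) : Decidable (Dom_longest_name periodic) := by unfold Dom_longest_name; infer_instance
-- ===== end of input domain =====

-- B replaces A's running-max-with-reset loop by a filter-then-max-then-filter decomposition (simpler; same return values).

-- ===== PORT A =====
-- A's for-loop over `periodic` with state (prev, newlist)
def pvLoopA : List (String × String) → Int → List String → List String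
  | [], _, newlist => newlist
  | elements :: rest, prev, newlist =>
    if PySem.Str.len elements.1 > prev ∧ PySem.Str.len elements.1 < 12 then
      pvLoopA rest (PySem.Str.len elements.1) [elements.1]
    else if PySem.Str.len elements.1 = prev then
      pvLoopA rest prev (newlist ++ [elements.1])
    else
      pvLoopA rest prev newlist

def longest_name (periodic : List (String × String)) : List String :=
  pvLoopA periodic 0 []

-- ===== PORT B =====
def longest_name_alt (periodic : List (String × String)) : List String :=
  let names := (periodic.filter (fun elements => PySem.Str.len elements.1 < 12)).map Prod.fst
  if names = [] then []
  else
    match PySem.List.max? (names.map PySem.Str.len) (fun y => y) with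
    | some m => names.filter (fun n => PySem.Str.len n = m)
    | none => []   -- unreachable: names ≠ []

-- ===== PRECONDITION & SPEC =====
def Spec_longest_name (periodic : List (String × String)) (out : List String) : Prop := out = longest_name_alt periodic
instance (periodic : List (String × String)) (out : List String) : Decidable (Spec_longest_name periodic out) := by unfold Spec_longest_name; infer_instance

-- ===== CLAIM (what is proved, stated in full; the proofs are below) =====
def Claim_equal_longest_name : Prop := ∀ (periodic : List (String × String)), Dom_longest_name periodic → Spec_longest_name periodic (longest_name periodic)

-- ===== LEMMAS AND PROOFS =====

-- the qualifying names (first components of length < 12), in order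
def pvNames (l : List (String × String)) : List String :=
  (l.filter (fun elements => PySem.Str.len elements.1 < 12)).map Prod.fst

-- running max of the qualifying lengths, starting from prev
def pvM (l : List (String × String)) (prev : Int) : Int :=
  ((pvNames l).map PySem.Str.len).foldl max prev

lemma pvNames_cons_lt (e : String × String) (t : List (String × String)) (h : PySem.Str.len e.1 < 12) :
    pvNames (e :: t) = e.1 :: pvNames t := by
  simp only [pvNames, List.filter_cons, decide_eq_true h, if_true]
  simp

lemma pvNames_cons_ge (e : String × String) (t : List (String × String)) (h : ¬ PySem.Str.len e.1 < 12) :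
    pvNames (e :: t) = pvNames t := by
  simp only [pvNames, List.filter_cons, decide_eq_false h]
  simp

lemma pvM_cons_lt (e : String × String) (t : List (String × String)) (h : PySem.Str.len e.1 < 12) (prev : Int) :
    pvM (e :: t) prev = pvM t (max prev (PySem.Str.len e.1)) := by
  rw [pvM, pvNames_cons_lt e t h, List.map_cons, List.foldl_cons, pvM]

lemma pvM_cons_ge (e : String × String) (t : List (String × String)) (h : ¬ PySem.Str.len e.1 < 12) (prev : Int) :
    pvM (e :: t) prev = pvM t prev := by
  rw [pvM, pvNames_cons_ge e t h, pvM]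

lemma pvM_ge (l : List (String × String)) (prev : Int) : prev ≤ pvM l prev :=
  (PySem.List.le_foldl_max ((pvNames l).map PySem.Str.len) prev).1

lemma len_nonneg (s : String) : (0 : Int) ≤ PySem.Str.len s := by
  rw [PySem.Str.len_eq]; exact Int.natCast_nonneg _

lemma pvLoopA_spec (l : List (String × String)) : ∀ (prev : Int) (acc : List String), prev < 12 →
    pvLoopA l prev acc =
      (if pvM l prev = prev then acc else []) ++
        (pvNames l).filter (fun n => PySem.Str.len n = pvM l prev) := by
  induction l with
  | nil => intro prev acc _; simp [pvLoopA, pvNames, pvM]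
  | cons e t ih =>
    intro prev acc hprev
    by_cases h1 : PySem.Str.len e.1 > prev ∧ PySem.Str.len e.1 < 12
    · have hge : PySem.Str.len e.1 ≤ pvM t (PySem.Str.len e.1) := pvM_ge t _
      have hne : ¬ pvM t (PySem.Str.len e.1) = prev := by have := h1.1; omega
      rw [pvLoopA, if_pos h1, ih _ [e.1] h1.2, pvM_cons_lt e t h1.2 prev,
        max_eq_right (le_of_lt h1.1), pvNames_cons_lt e t h1.2, if_neg hne]
      by_cases hm : PySem.Str.len e.1 = pvM t (PySem.Str.len e.1)
      · rw [if_pos hm.symm]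
        simp only [List.filter_cons, decide_eq_true hm]
        simp
      · rw [if_neg (fun hx => hm hx.symm)]
        simp only [List.filter_cons, decide_eq_false hm]
        simp
    · by_cases h2 : PySem.Str.len e.1 = prev
      · have hlt : PySem.Str.len e.1 < 12 := by omega
        have hM : pvM (e :: t) prev = pvM t prev := by
          rw [pvM_cons_lt e t hlt, h2, max_self]
        rw [pvLoopA, if_neg h1, if_pos h2, ih _ (acc ++ [e.1]) hprev, hM,
          pvNames_cons_lt e t hlt]
        by_cases hm : pvM t prev = prev
        · rw [if_pos hm, if_pos hm]
          simp only [List.filter_cons, decide_eq_true (h2.trans hm.symm)]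
          simp
        · have hm2 : ¬ PySem.Str.len e.1 = pvM t prev := by
            rw [h2]; exact fun hx => hm hx.symm
          rw [if_neg hm, if_neg hm]
          simp only [List.filter_cons, decide_eq_false hm2]
          simp
      · rw [pvLoopA, if_neg h1, if_neg h2, ih _ acc hprev]
        by_cases hlt : PySem.Str.len e.1 < 12
        · have hle : PySem.Str.len e.1 < prev := by
            rcases not_and_or.mp h1 with h | h
            · omega
            · exact absurd hlt h
          have hM : pvM (e :: t) prev = pvM t prev := by
            rw [pvM_cons_lt e t hlt, max_eq_left (le_of_lt hle)]
          have hne : ¬ PySem.Str.len e.1 = pvM t prev := by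
            have := pvM_ge t prev; omega
          rw [hM, pvNames_cons_lt e t hlt]
          simp only [List.filter_cons, decide_eq_false hne]
          simp
        · rw [pvM_cons_ge e t hlt, pvNames_cons_ge e t hlt]

-- ===== VERDICT (by name: the statement is the Claim_ definition above) =====
theorem longest_name_spec : Claim_equal_longest_name := by
  intro periodic _
  show longest_name periodic = longest_name_alt periodic
  have halt : longest_name_alt periodic =
      if pvNames periodic = [] then []
      else
        match PySem.List.max? ((pvNames periodic).map PySem.Str.len) (fun y => y) with
        | some m => (pvNames periodic).filter (fun n => PySem.Str.len n = m)
        | none => [] := rfl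
  rw [longest_name, pvLoopA_spec periodic 0 [] (by norm_num), halt]
  have hifs : (if pvM periodic 0 = 0 then ([] : List String) else []) = [] := by
    split <;> rfl
  rw [hifs, List.nil_append]
  rcases hN : pvNames periodic with _ | ⟨h, t⟩
  · simp
  · have hM0 : pvM periodic 0 = (t.map PySem.Str.len).foldl max (PySem.Str.len h) := by
      rw [pvM, hN, List.map_cons, List.foldl_cons, max_eq_right (len_nonneg h)]
    rw [hM0, if_neg (List.cons_ne_nil h t), List.map_cons, PySem.List.max?_id_cons]
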